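-- pv_equiv track=rewrite | github.com/jcolinpatrick/kryptos | scripts/blitz/blitz_wildcard_grille.py | double_rotation
-- ===== SOURCE A (Python) =====
-- def double_rotation(n, r1, c1):
--     """Returns permutation perm where perm[output_pos] = input_pos."""
--     assert r1 * c1 == n
--     # Grid 1: r1 rows × c1 cols, fill row by row
--     # Rotate CW: new[c1_new][r1-1-r] = grid[r][c1_new] → dims c1 × r1
--     r2, c2 = c1, r1  # After first CW rotation: c1 rows × r1 cols
--     # Intermediate position of input[i]:
--     # Input at position i = (i//c1, i%c1) in grid1
--     # After CW rotation: (col_old, r1-1-row_old) = (i%c1, r1-1-i//c1) in grid2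
--     # Position in grid2 (read row-by-row): (i%c1) * r1 + (r1-1-i//c1)
--     def input_to_inter(i):
--         r, c = i // c1, i % c1
--         return c * r1 + (r1 - 1 - r)  # intermediate position
--
--     # Grid 2: r2 rows × c2 cols (= c1 rows × r1 cols), intermediate written in
--     # Rotate CW: new[c2_new][r2-1-r] = grid2[r][c2_new] → dims c2 × r2 = r1 × c1
--     r3, c3 = c2, r2  # = r1, c1
--     def inter_to_output(inter):
--         r, c = inter // c2, inter % c2
--         return c * r2 + (r2 - 1 - r)  # output position
--
--     perm = [inter_to_output(input_to_inter(i)) for i in range(n)]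
--     return perm
-- ===== SOURCE B (Python) =====
-- def double_rotation(n, r1, c1):
--     """Returns permutation perm where perm[output_pos] = input_pos."""
--     assert r1 * c1 == n
--     # Two clockwise rotations compose to a 180-degree rotation, which in
--     # row-major reading is a full index reversal: perm[i] = n - 1 - i.
--     return list(range(n - 1, -1, -1))
-- ===== Notes on version B (the rewrite author's own statement) =====
-- stated objective: simpler
-- what changed: Replaces the two-stage coordinate arithmetic (floor-division/mod per grid rotation) with the closed form of a 180-degree rotation: the reversed index list range(n-1,-1,-1).
-- intended difference: When both r1 and c1 are negative (so r1*c1 == n > 0 passes the assert), A's floor-division coordinate arithmetic returns negative out-of-range 'positions' that are not a permutation, while B returns the intended reversed permutation [n-1,...,0]. — e.g. on double_rotation(4, -2, -2): A returns [-2, -3, -4, 0], B returns [3, 2, 1, 0]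
import Mathlib
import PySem

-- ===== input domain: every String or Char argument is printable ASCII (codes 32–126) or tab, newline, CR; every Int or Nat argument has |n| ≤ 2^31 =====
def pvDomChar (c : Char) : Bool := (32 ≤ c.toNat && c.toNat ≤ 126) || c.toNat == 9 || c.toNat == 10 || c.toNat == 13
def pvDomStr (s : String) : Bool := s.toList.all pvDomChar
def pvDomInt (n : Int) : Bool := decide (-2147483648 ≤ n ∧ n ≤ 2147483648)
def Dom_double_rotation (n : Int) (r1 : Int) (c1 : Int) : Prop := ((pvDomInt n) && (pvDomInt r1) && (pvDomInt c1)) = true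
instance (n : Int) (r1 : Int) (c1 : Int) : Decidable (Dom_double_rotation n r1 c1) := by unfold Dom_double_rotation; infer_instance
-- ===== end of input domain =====

-- B replaces A's per-element rotation arithmetic by the closed-form index reversal range(n-1,-1,-1) (simpler).


-- ===== PORT A =====
-- helper input_to_inter (closure over c1, r1)
def pvInputToInter (c1 r1 i : Int) : Int :=
  let r := PySem.Int.floordiv i c1
  let c := PySem.Int.mod i c1
  c * r1 + (r1 - 1 - r)

-- helper inter_to_output (closure over c2 = c1-after-swap and r2)
def pvInterToOutput (c2 r2 inter : Int) : Int :=
  let r := PySem.Int.floordiv inter c2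
  let c := PySem.Int.mod inter c2
  c * r2 + (r2 - 1 - r)

def double_rotation (n : Int) (r1 : Int) (c1 : Int) : List Int :=
  -- assert r1 * c1 == n  → Pre_double_rotation
  let r2 := c1
  let c2 := r1
  (PySem.List.pyRange 0 n 1).map (fun i => pvInterToOutput c2 r2 (pvInputToInter c1 r1 i))

-- ===== PORT B =====
def double_rotation_alt (n : Int) (r1 : Int) (c1 : Int) : List Int :=
  -- assert r1 * c1 == n  → Pre_double_rotation
  PySem.List.pyRange (n - 1) (-1) (-1)

-- ===== PRECONDITION & SPEC =====
-- Pre_: exactly the inputs where A's assert passes (otherwise AssertionError).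
def Pre_double_rotation (n : Int) (r1 : Int) (c1 : Int) : Prop := r1 * c1 = n
instance (n : Int) (r1 : Int) (c1 : Int) : Decidable (Pre_double_rotation n r1 c1) := by unfold Pre_double_rotation; infer_instance
def pvWitness_double_rotation : Int × Int × Int := (6, 2, 3)

-- When both r1 and c1 are negative (so the assert still passes with n = r1*c1 > 0), A's
-- floor-division coordinate arithmetic returns negative out-of-range "positions" that are
-- not a permutation, while B returns the intended reversed permutation [n-1, …, 0].
def D_double_rotation (n : Int) (r1 : Int) (c1 : Int) : Prop := r1 < 0 ∧ c1 < 0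
instance (n : Int) (r1 : Int) (c1 : Int) : Decidable (D_double_rotation n r1 c1) := by unfold D_double_rotation; infer_instance

def Spec_double_rotation (n : Int) (r1 : Int) (c1 : Int) (out : List Int) : Prop :=
  ¬ D_double_rotation n r1 c1 → out = double_rotation_alt n r1 c1
instance (n : Int) (r1 : Int) (c1 : Int) (out : List Int) : Decidable (Spec_double_rotation n r1 c1 out) := by unfold Spec_double_rotation; infer_instance

def pvDiffWitness_double_rotation : Int × Int × Int := (4, -2, -2)
def pvDiffWitnessOut_double_rotation : (List Int) × (List Int) := ([-2, -3, -4, 0], [3, 2, 1, 0])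

-- ===== CLAIM (what is proved, stated in full; the proofs are below) =====
def Claim_unchanged_double_rotation : Prop := ∀ (n : Int) (r1 : Int) (c1 : Int), Dom_double_rotation n r1 c1 → Pre_double_rotation n r1 c1 → Spec_double_rotation n r1 c1 (double_rotation n r1 c1)
def Claim_changed_double_rotation : Prop := Dom_double_rotation (pvDiffWitness_double_rotation.1) (pvDiffWitness_double_rotation.2.1) (pvDiffWitness_double_rotation.2.2) ∧ Pre_double_rotation (pvDiffWitness_double_rotation.1) (pvDiffWitness_double_rotation.2.1) (pvDiffWitness_double_rotation.2.2) ∧ D_double_rotation (pvDiffWitness_double_rotation.1) (pvDiffWitness_double_rotation.2.1) (pvDiffWitness_double_rotation.2.2) ∧ double_rotation (pvDiffWitness_double_rotation.1) (pvDiffWitness_double_rotation.2.1) (pvDiffWitness_double_rotation.2.2) = pvDiffWitnessOut_double_rotation.1 ∧ double_rotation_alt (pvDiffWitness_double_rotation.1) (pvDiffWitness_double_rotation.2.1) (pvDiffWitness_double_rotation.2.2) = pvDiffWitnessOut_double_rotation.2 ∧ pvDiffWitnessOut_double_rotation.1 ≠ pvDiffWitnessOut_double_rotation.2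

def Claim_exact_double_rotation : Prop := ∀ (n : Int) (r1 : Int) (c1 : Int), Dom_double_rotation n r1 c1 → Pre_double_rotation n r1 c1 → D_double_rotation n r1 c1 → double_rotation n r1 c1 ≠ double_rotation_alt n r1 c1

-- ===== LEMMAS AND PROOFS =====

-- With r1 < 0 and c1 < 0 the composed map sends input 0 to a negative "position".
lemma pv_head_neg (r1 c1 : Int) (hr : r1 < 0) (hc : c1 < 0) :
    pvInterToOutput r1 c1 (pvInputToInter c1 r1 0) < 0 := by
  have hm0 : PySem.Int.mod 0 c1 = 0 := (PySem.Int.mod_eq_zero_iff_dvd 0 c1).mpr (dvd_zero c1)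
  have hsum0 := PySem.Int.floordiv_mul_add_mod 0 c1
  rw [hm0] at hsum0
  have hf0 : PySem.Int.floordiv 0 c1 = 0 := by
    rcases mul_eq_zero.mp (by omega : PySem.Int.floordiv 0 c1 * c1 = 0) with h | h
    · exact h
    · omega
  have hinter : pvInputToInter c1 r1 0 = r1 - 1 := by
    simp [pvInputToInter, hm0, hf0]
  rw [hinter]
  unfold pvInterToOutput
  set r := PySem.Int.floordiv (r1 - 1) r1 with hrdef
  set m := PySem.Int.mod (r1 - 1) r1 with hmdef
  have hb := PySem.Int.mod_neg_bounds (a := r1 - 1) hr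
  have hs := PySem.Int.floordiv_mul_add_mod (r1 - 1) r1
  rw [← hrdef] at hs
  show m * c1 + (c1 - 1 - r) < 0
  rcases eq_or_lt_of_le (show r1 ≤ -1 by omega) with h1 | h2
  · -- r1 = -1 : m = 0, r = 2
    have hm : m = 0 := by omega
    have hrv : r = 2 := by
      have : r * r1 = r1 - 1 - m := by omega
      rw [h1] at this
      omega
    rw [hm, hrv]
    omega
  · -- r1 ≤ -2 : r = 1, m = -1
    have hneg : r * r1 = r1 - 1 - m := by omega
    have hr1 : 1 ≤ r := by
      by_contra h
      push_neg at h
      have : 0 ≤ r * r1 := by nlinarith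
      omega
    have hr2 : r < 2 := by
      by_contra h
      push_neg at h
      have : r * r1 ≤ 2 * r1 := by nlinarith
      omega
    have hrv : r = 1 := by omega
    have hm : m = -1 := by
      rw [hrv] at hneg; omega
    rw [hrv, hm]
    omega

-- Core computation: for 0 < r1, 0 < c1 and 0 ≤ i < r1*c1, A's composed map is the reversal.
lemma pv_elem (r1 c1 i : Int) (hr : 0 < r1) (hc : 0 < c1) (hi0 : 0 ≤ i) (hin : i < r1 * c1) :
    pvInterToOutput r1 c1 (pvInputToInter c1 r1 i) = r1 * c1 - 1 - i := by
  have hq := PySem.Int.floordiv_eq_ediv_of_pos (a := i) hc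
  have hm := PySem.Int.mod_eq_emod_of_pos (a := i) hc
  set q := i / c1 with hqdef
  set c := i % c1 with hcdef
  have hsum : c1 * q + c = i := Int.ediv_add_emod i c1
  have hc0 : 0 ≤ c := Int.emod_nonneg i (by omega)
  have hclt : c < c1 := Int.emod_lt_of_pos i hc
  have hq0 : 0 ≤ q := Int.ediv_nonneg hi0 (le_of_lt hc)
  have hqlt : q < r1 := by
    by_contra h
    push_neg at h
    have : r1 * c1 ≤ q * c1 := by
      exact mul_le_mul_of_nonneg_right h (le_of_lt hc)
    nlinarith
  -- intermediate value
  have hinter : pvInputToInter c1 r1 i = c * r1 + (r1 - 1 - q) := by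
    simp [pvInputToInter, hq, hm]
  rw [hinter]
  have ht0 : 0 ≤ r1 - 1 - q := by omega
  have htlt : r1 - 1 - q < r1 := by omega
  -- second stage: floordiv/mod of c*r1 + t by r1
  have hfd : PySem.Int.floordiv (c * r1 + (r1 - 1 - q)) r1 = c := by
    rw [PySem.Int.floordiv_eq_iff_of_pos hr]
    constructor
    · nlinarith
    · nlinarith
  have hmd : PySem.Int.mod (c * r1 + (r1 - 1 - q)) r1 = r1 - 1 - q := by
    have := PySem.Int.floordiv_mul_add_mod (c * r1 + (r1 - 1 - q)) r1
    rw [hfd] at this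
    omega
  simp only [pvInterToOutput, hfd, hmd]
  nlinarith [hsum]

lemma pv_lists (n r1 c1 : Int) (hpre : r1 * c1 = n) (hnd : ¬ (r1 < 0 ∧ c1 < 0)) :
    (PySem.List.pyRange 0 n 1).map (fun i => pvInterToOutput r1 c1 (pvInputToInter c1 r1 i))
      = PySem.List.pyRange (n - 1) (-1) (-1) := by
  rw [PySem.List.pyRange_one, PySem.List.pyRange_neg_one]
  rcases le_or_gt n 0 with hn | hn
  · rw [show (n - 0).toNat = 0 by omega, show (n - 1 - (-1)).toNat = 0 by omega]
    simp
  · have hr1 : 0 < r1 := by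
      rcases lt_trichotomy r1 0 with h | h | h
      · rcases lt_trichotomy c1 0 with h2 | h2 | h2
        · exact absurd ⟨h, h2⟩ hnd
        · rw [h2, mul_zero] at hpre; omega
        · nlinarith
      · rw [h, zero_mul] at hpre; omega
      · exact h
    have hr : 0 < r1 ∧ 0 < c1 := ⟨hr1, by nlinarith⟩
    have hlen : (n - 0).toNat = (n - 1 - (-1)).toNat := by omega
    rw [hlen, List.map_map]
    apply List.map_congr_left
    intro k hk
    simp only [Function.comp]
    have hk' : (k : Int) < n := by
      have := List.mem_range.mp hk
      omega
    have hk0 : (0 : Int) ≤ (k : Int) := Int.natCast_nonneg k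
    have := pv_elem r1 c1 ((0 : Int) + k) hr.1 hr.2 (by omega) (by omega)
    simp only [zero_add] at this ⊢
    rw [this, hpre]

-- ===== VERDICT (by name: the statement is the Claim_ definition above) =====
theorem double_rotation_spec : Claim_unchanged_double_rotation := by
  intro n r1 c1 _ hpre
  unfold Spec_double_rotation D_double_rotation
  intro hnd
  unfold double_rotation double_rotation_alt
  exact pv_lists n r1 c1 hpre hnd

theorem double_rotation_changed : Claim_changed_double_rotation := by
  unfold Claim_changed_double_rotation; decide

theorem double_rotation_tight : Claim_exact_double_rotation := by
  intro n r1 c1 _ hpre hD heq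
  obtain ⟨hr, hc⟩ : r1 < 0 ∧ c1 < 0 := hD
  have hn : 0 < n := by
    rw [← hpre]
    exact mul_pos_of_neg_of_neg hr hc
  simp only [double_rotation, double_rotation_alt] at heq
  rw [PySem.List.pyRange_one_cons (by omega : (0 : Int) < n),
      PySem.List.pyRange_neg_one_cons (by omega : (-1 : Int) < n - 1)] at heq
  simp only [List.map_cons, List.cons.injEq] at heq
  have hhead := pv_head_neg r1 c1 hr hc
  omega
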